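-- pv_equiv track=rewrite | github.com/OpenDaL/datacatalog-frontend | django/datacatalog/dcsearch/views.py | _get_result_key_priority
-- ===== SOURCE A (Python) =====
-- import copy
--
-- VIZ_KEY_PRIORITY = ['subject', 'format', 'created', 'issued', 'modified',
--                     'language', 'version', 'status', 'license']
--
-- def _get_result_key_priority(search_query):
--     """
--     Determines in what order key/value combinations of keys have to be
--     visualized. If keys such as type and format are queried, they don't need
--     to be shown anymore, since they're the same for all results. Dates do need
--     to be shown
--     """
--     none_values = set([None, '', '*'])
--     # Determine which keys were queried
--     queried_keys = set()
--     for key, value in search_query.items():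
--         if value not in none_values:
--             queried_keys.add(key)
--
--     # Now reorder the default list:
--     key_priority = copy.copy(VIZ_KEY_PRIORITY)
--     deferred = []
--     for ind_ in reversed(range(len(key_priority))):
--         p_key = key_priority[ind_]
--         # In case it is queried, defer it in priority list
--         if p_key in queried_keys:
--             # This already ensures date keys are not moved, since in the query
--             # These have _lte and _gte attached
--             del key_priority[ind_]
--             deferred.append(p_key)
--
--     # Add deferred to end of list
--     return key_priority + deferred
-- ===== SOURCE B (Python) =====
-- VIZ_KEY_PRIORITY = ['subject', 'format', 'created', 'issued', 'modified',
--                     'language', 'version', 'status', 'license']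
--
-- def _get_result_key_priority(search_query):
--     none_values = {None, '', '*'}
--     queried = {k for k, v in search_query.items() if v not in none_values}
--     kept = [k for k in VIZ_KEY_PRIORITY if k not in queried]
--     deferred = [k for k in reversed(VIZ_KEY_PRIORITY) if k in queried]
--     return kept + deferred
-- ===== Notes on version B (the rewrite author's own statement) =====
-- stated objective: simpler
-- what changed: Replaces A's in-place reverse-index deletion loop (del key_priority[ind_] while iterating reversed(range(len))) by a pure two-pass partition: one forward comprehension keeps unqueried keys, one comprehension over reversed(VIZ_KEY_PRIORITY) collects the deferred keys in A's reverse order.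
import Mathlib
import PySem

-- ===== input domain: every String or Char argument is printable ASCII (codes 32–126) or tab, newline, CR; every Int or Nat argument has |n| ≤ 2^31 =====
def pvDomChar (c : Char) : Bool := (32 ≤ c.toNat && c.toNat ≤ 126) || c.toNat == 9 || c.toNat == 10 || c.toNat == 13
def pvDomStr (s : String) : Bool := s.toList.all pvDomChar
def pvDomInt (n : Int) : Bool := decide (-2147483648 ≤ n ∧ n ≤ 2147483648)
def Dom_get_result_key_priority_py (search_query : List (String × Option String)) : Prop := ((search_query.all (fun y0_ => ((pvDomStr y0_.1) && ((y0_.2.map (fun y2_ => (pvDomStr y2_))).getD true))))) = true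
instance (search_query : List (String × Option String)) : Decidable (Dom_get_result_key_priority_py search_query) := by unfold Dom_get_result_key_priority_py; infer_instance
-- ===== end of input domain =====

-- B replaces A's in-place reverse-index deletion loop by a pure two-pass partition
-- (forward filter for kept keys, reverse filter for deferred keys); objective: simpler.


-- ===== PORT A =====
-- VIZ_KEY_PRIORITY (module constant)
def pvVIZ : List String :=
  ["subject", "format", "created", "issued", "modified",
   "language", "version", "status", "license"]

-- 'queried_keys': the keys whose value is not in {None, '', '*'} (A's first loop;
-- B builds the identical set, so both ports share this helper).
def pvQueriedKeys (search_query : List (String × Option String)) : PySem.Set String :=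
  search_query.foldl
    (fun qs kv =>
      if !(kv.2 == none || kv.2 == some "" || kv.2 == some "*") then PySem.Set.add qs kv.1 else qs)
    PySem.Set.empty

def get_result_key_priority_py (search_query : List (String × Option String)) : List String :=
  let queried_keys := pvQueriedKeys search_query
  -- for ind_ in reversed(range(len(key_priority))): … del key_priority[ind_] …
  -- pyGet? never returns none here (the indices stay in range as the list shrinks);
  -- the none branch keeps the state, making the step total.
  let res := ((PySem.List.pyRange 0 (pvVIZ.length : Int) 1).reverse).foldl
    (fun (st : List String × List String) ind_ =>
      match PySem.List.pyGet? st.1 ind_ with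
      | none => st
      | some p_key =>
          if PySem.Set.contains queried_keys p_key then
            (st.1.eraseIdx ind_.toNat, st.2 ++ [p_key])
          else st)
    (pvVIZ, ([] : List String))
  res.1 ++ res.2

-- ===== PORT B =====
def get_result_key_priority_py_alt (search_query : List (String × Option String)) : List String :=
  let queried := pvQueriedKeys search_query
  (pvVIZ.filter (fun k => !(PySem.Set.contains queried k))) ++
    (pvVIZ.reverse.filter (fun k => PySem.Set.contains queried k))

-- ===== PRECONDITION & SPEC =====
def Spec_get_result_key_priority_py (search_query : List (String × Option String)) (out : List String) : Prop := out = get_result_key_priority_py_alt search_query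
instance (search_query : List (String × Option String)) (out : List String) : Decidable (Spec_get_result_key_priority_py search_query out) := by unfold Spec_get_result_key_priority_py; infer_instance

-- ===== CLAIM (what is proved, stated in full; the proofs are below) =====
def Claim_equal_get_result_key_priority_py : Prop := ∀ (search_query : List (String × Option String)), Dom_get_result_key_priority_py search_query → Spec_get_result_key_priority_py search_query (get_result_key_priority_py search_query)

-- ===== LEMMAS AND PROOFS =====

-- Invariant of A's reverse-index deletion loop, for ANY membership predicate p and any
-- list l: running the loop over reversed(range(len l)) on state (l ++ suffix, acc)
-- leaves the non-p elements of l (in order, before suffix) and appends l's p-elements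
-- to acc in reverse order.  Proved by induction on l from the right (the loop touches
-- the last element of l first).
theorem pvLoop (p : String → Bool) (l : List String) : ∀ (suffix acc : List String),
    ((PySem.List.pyRange 0 (l.length : Int) 1).reverse).foldl
      (fun (st : List String × List String) ind_ =>
        match PySem.List.pyGet? st.1 ind_ with
        | none => st
        | some p_key => if p p_key then (st.1.eraseIdx ind_.toNat, st.2 ++ [p_key]) else st)
      (l ++ suffix, acc)
    = (l.filter (fun k => !(p k)) ++ suffix, acc ++ (l.reverse.filter p)) := by
  induction l using List.reverseRecOn with
  | nil => intro suffix acc; simp [PySem.List.pyRange_one_eq_nil]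
  | append_singleton l' x ih =>
    intro suffix acc
    have hlen : (((l' ++ [x]).length : Int)) = (l'.length : Int) + 1 := by
      simp
    rw [hlen, PySem.List.pyRange_one_succ_right (by positivity), List.reverse_append]
    simp only [List.reverse_cons, List.reverse_nil, List.nil_append, List.singleton_append,
      List.foldl_cons]
    have hget : PySem.List.pyGet? (l' ++ [x] ++ suffix) ((l'.length : Int)) = some x := by
      rw [PySem.List.pyGet?_natCast]
      simp
    rw [List.append_assoc l' [x] suffix] at hget ⊢
    simp only [hget]
    cases hp : p x
    · simp only [Bool.false_eq_true, if_false]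
      rw [show l' ++ ([x] ++ suffix) = l' ++ (x :: suffix) from rfl, ih (x :: suffix) acc]
      simp [hp, List.filter_append]
    · simp only [if_true, Int.toNat_natCast]
      rw [List.eraseIdx_append_of_length_le (le_refl _)]
      simp only [Nat.sub_self, show ([x] ++ suffix).eraseIdx 0 = suffix from rfl]
      rw [ih suffix (acc ++ [x])]
      simp [hp, List.filter_append]

-- ===== VERDICT (by name: the statement is the Claim_ definition above) =====
theorem get_result_key_priority_py_spec : Claim_equal_get_result_key_priority_py := by
  intro search_query _
  show get_result_key_priority_py search_query = get_result_key_priority_py_alt search_query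
  unfold get_result_key_priority_py get_result_key_priority_py_alt
  have h := pvLoop (fun k => PySem.Set.contains (pvQueriedKeys search_query) k) pvVIZ [] []
  simp only [List.append_nil] at h
  simp only [h, List.nil_append]
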